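-- pv_equiv track=rewrite | github.com/leoee/Tibia-Bot-12- | controller.py | convertNumbersToString
-- ===== SOURCE A (Python) =====
-- def convertNumbersToString(validIndex, vector, currentValue):
-- 	while(validIndex):
-- 		max = 2000
-- 		indexRemoved = 0
-- 		insideIndexRemove = 0
-- 		for value in vector:
-- 			if (vector[value] != None):
-- 				for valueIntoItem in vector[value]:
-- 					if (max > valueIntoItem[0]):
-- 						indexRemoved = value
-- 						insideIndexRemove = valueIntoItem
-- 						max = valueIntoItem[0]
-- 		if (insideIndexRemove != 0):
-- 			vector[indexRemoved].remove(insideIndexRemove)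
-- 		currentValue += str(indexRemoved)
-- 		validIndex -= 1
-- 	return currentValue
-- ===== SOURCE B (Python) =====
-- # B: build the candidate pool once, sort it by (value, discovery order), then emit the
-- # keys in one pass -- instead of A's repeated full rescans with in-place removal.
-- # Note: A mutates `vector` (removes each extracted item); B leaves it untouched --
-- # the equivalence proved is about the RETURN value only.
-- def convertNumbersToString(validIndex, vector, currentValue):
-- 	if validIndex <= 0:
-- 		return currentValue
-- 	entries = []
-- 	for key in vector:
-- 		items = vector[key]
-- 		if items is not None:
-- 			for item in items:
-- 				if item[0] < 2000:
-- 					entries.append((item[0], len(entries), key))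
-- 	entries.sort(key=lambda e: (e[0], e[1]))
-- 	parts = [currentValue]
-- 	remaining = validIndex
-- 	for entry in entries:
-- 		if remaining <= 0:
-- 			break
-- 		parts.append(str(entry[2]))
-- 		remaining -= 1
-- 	if remaining > 0:
-- 		parts.append('0' * remaining)
-- 	return ''.join(parts)
-- ===== Notes on version B (the rewrite author's own statement) =====
-- stated objective: faster
-- what changed: A rescans the whole dict (and mutates it) once per extracted element; B builds the candidate pool once, sorts it by (value, discovery order) and emits the keys in a single pass, padding with '0'.
import Mathlib
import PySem

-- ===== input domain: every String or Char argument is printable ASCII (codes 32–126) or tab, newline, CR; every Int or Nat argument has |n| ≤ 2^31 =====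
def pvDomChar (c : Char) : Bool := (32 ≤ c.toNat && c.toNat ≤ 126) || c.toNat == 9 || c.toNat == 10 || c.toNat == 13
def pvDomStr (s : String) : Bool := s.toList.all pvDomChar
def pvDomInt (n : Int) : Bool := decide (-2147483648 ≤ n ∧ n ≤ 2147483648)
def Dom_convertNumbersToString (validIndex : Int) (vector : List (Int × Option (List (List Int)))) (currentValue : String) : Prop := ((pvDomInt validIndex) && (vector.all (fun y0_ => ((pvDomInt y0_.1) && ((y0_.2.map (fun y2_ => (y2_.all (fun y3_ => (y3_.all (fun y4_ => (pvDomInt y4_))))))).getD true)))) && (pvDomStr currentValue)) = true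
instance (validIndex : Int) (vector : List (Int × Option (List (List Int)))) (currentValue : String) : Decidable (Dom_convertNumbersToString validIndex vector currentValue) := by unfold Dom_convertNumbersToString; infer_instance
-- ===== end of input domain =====

-- B replaces A's per-extraction full rescan of the dict (with in-place removal) by building the
-- candidate pool once, sorting it by (value, discovery order) and emitting the keys in one pass.
-- A mutates `vector` (it removes each extracted item); B does not: the equivalence proved here is
-- about the RETURN value only.

-- ===== PORT A =====
-- one scan 'for value in vector: for valueIntoItem in vector[value]: …' of A's while-body;
-- item[0] is ported as pyGetD item 0 0 — exact under Pre_ (no empty inner item list reachable)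
def aScan (vector : List (Int × Option (List (List Int)))) : Int × Int × Option (List Int) :=
  vector.foldl
    (fun st kv =>
      match (PySem.Dict.get? ⟨vector⟩ kv.1).getD none with
      | none => st
      | some items =>
          items.foldl
            (fun st item =>
              if st.1 > PySem.List.pyGetD item 0 0 then
                (PySem.List.pyGetD item 0 0, kv.1, some item)
              else st)
            st)
    (2000, 0, none)

-- 'vector[indexRemoved].remove(insideIndexRemove)'; the removed item is always present there,
-- so remove?'s getD fallback never fires under Pre_
def aRemove (vector : List (Int × Option (List (List Int)))) (idx : Int) (item : List Int) : List (Int × Option (List (List Int))) :=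
  (PySem.Dict.modify ⟨vector⟩ idx none
    (fun ov => match ov with
      | some l => some ((PySem.List.remove? l item).getD l)
      | none => none)).items

-- the while-loop; 'while validIndex: … validIndex -= 1' runs validIndex.toNat times (Pre_: 0 ≤ validIndex)
def aLoop : Nat → List (Int × Option (List (List Int))) → String → String
  | 0, _, cur => cur
  | n+1, vec, cur =>
      let s := aScan vec
      let vec' := match s.2.2 with
        | some item => aRemove vec s.2.1 item
        | none => vec
      aLoop n vec' (cur ++ PySem.Int.toStr s.2.1)

def convertNumbersToString (validIndex : Int) (vector : List (Int × Option (List (List Int)))) (currentValue : String) : String :=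
  aLoop validIndex.toNat vector currentValue

-- ===== PORT B =====
-- the candidate pool: (item[0], len(entries), key) for every item with item[0] < 2000
def bEntries (vector : List (Int × Option (List (List Int)))) : List (Int × Int × Int) :=
  vector.foldl
    (fun entries kv =>
      match (PySem.Dict.get? ⟨vector⟩ kv.1).getD none with
      | none => entries
      | some items =>
          items.foldl
            (fun es item =>
              if PySem.List.pyGetD item 0 0 < 2000 then
                es ++ [(PySem.List.pyGetD item 0 0, PySem.List.len es, kv.1)]
              else es)
            entries)
    []

def convertNumbersToString_alt (validIndex : Int) (vector : List (Int × Option (List (List Int)))) (currentValue : String) : String :=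
  if validIndex ≤ 0 then currentValue else
  let entries := PySem.List.sorted2 (bEntries vector) (fun e => e.1) (fun e => e.2.1)
  let st := entries.foldl
    (fun (st : String × Int) e =>
      if st.2 ≤ 0 then st else (st.1 ++ PySem.Int.toStr e.2.2, st.2 - 1))
    (currentValue, validIndex)
  if st.2 > 0 then st.1 ++ String.ofList (PySem.List.pyRepeat ['0'] st.2) else st.1

-- ===== PRECONDITION & SPEC =====
-- Pre_ excludes only inputs where A does not return normally, plus one assoc-list artifact:
-- negative validIndex (A's 'while validIndex' never terminates), empty inner item lists when
-- validIndex > 0 (A's loop body then evaluates item[0] and raises IndexError), and duplicate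
-- keys, which exist for the Lean association list only, never for a Python dict.
def Pre_convertNumbersToString (validIndex : Int) (vector : List (Int × Option (List (List Int)))) (currentValue : String) : Prop :=
  0 ≤ validIndex ∧ (vector.map Prod.fst).Nodup ∧
    (0 < validIndex →
      vector.all (fun kv => ((kv.2.map (fun l => l.all (fun item => !item.isEmpty))).getD true)) = true)
instance (validIndex : Int) (vector : List (Int × Option (List (List Int)))) (currentValue : String) : Decidable (Pre_convertNumbersToString validIndex vector currentValue) := by unfold Pre_convertNumbersToString; infer_instance

def pvWitness_convertNumbersToString : Int × (List (Int × Option (List (List Int)))) × String :=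
  (2, [(3, some [[1], [5]]), (7, none)], "x")

def Spec_convertNumbersToString (validIndex : Int) (vector : List (Int × Option (List (List Int)))) (currentValue : String) (out : String) : Prop := out = convertNumbersToString_alt validIndex vector currentValue
instance (validIndex : Int) (vector : List (Int × Option (List (List Int)))) (currentValue : String) (out : String) : Decidable (Spec_convertNumbersToString validIndex vector currentValue out) := by unfold Spec_convertNumbersToString; infer_instance

-- ===== CLAIM (what is proved, stated in full; the proofs are below) =====
def Claim_equal_convertNumbersToString : Prop := ∀ (validIndex : Int) (vector : List (Int × Option (List (List Int)))) (currentValue : String), Dom_convertNumbersToString validIndex vector currentValue → Pre_convertNumbersToString validIndex vector currentValue → Spec_convertNumbersToString validIndex vector currentValue (convertNumbersToString validIndex vector currentValue)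

-- ===== LEMMAS AND PROOFS =====

-- the traversal-order candidate list: (item[0], item, key) triples
def candOf (k : Int) (item : List Int) : Int × List Int × Int := (PySem.List.pyGetD item 0 0, item, k)
def blockC (kv : Int × Option (List (List Int))) : List (Int × List Int × Int) := (kv.2.getD []).map (candOf kv.1)
def cands (vec : List (Int × Option (List (List Int)))) : List (Int × List Int × Int) := vec.flatMap blockC
def fcands (vec : List (Int × Option (List (List Int)))) : List (Int × List Int × Int) :=
  (cands vec).filter (fun c => c.1 < 2000)

-- A's scan step on a candidate
def sstep (st : Int × Int × Option (List Int)) (c : Int × List Int × Int) : Int × Int × Option (List Int) :=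
  if st.1 > c.1 then (c.1, c.2.2, some c.2.1) else st

-- B's entry tagging: (val, seq, key) with consecutive sequence numbers from n
def tagFrom : Int → List (Int × List Int × Int) → List (Int × Int × Int)
  | _, [] => []
  | n, c :: cs => (c.1, n, c.2.2) :: tagFrom (n + 1) cs

def keyL (e : Int × Int × Int) : Int ×ₗ Int := toLex (e.1, e.2.1)

-- reference emitter: append str(key) for the first n keys, pad with '0' to n
def emitK : List Int → Nat → String → String
  | _, 0, cur => cur
  | [], n+1, cur => cur ++ String.ofList (List.replicate (n+1) '0')
  | k :: ks, n+1, cur => emitK ks n (cur ++ PySem.Int.toStr k)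

lemma foldl_flatMap' {α β γ : Type} (l : List α) (g : α → List β) (f : γ → β → γ) (init : γ) :
    (l.flatMap g).foldl f init = l.foldl (fun acc x => (g x).foldl f acc) init := by
  induction l generalizing init with
  | nil => rfl
  | cons h t ih => simp [List.foldl_append, ih]

lemma lookup_eq (vec : List (Int × Option (List (List Int)))) (hnd : (vec.map Prod.fst).Nodup)
    (kv : Int × Option (List (List Int))) (hm : kv ∈ vec) :
    (PySem.Dict.get? (⟨vec⟩ : PySem.Dict Int (Option (List (List Int)))) kv.1).getD none = kv.2 := by
  have h1 : (⟨vec⟩ : PySem.Dict Int (Option (List (List Int)))).get? kv.1 = some kv.2 := by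
    apply PySem.Dict.get?_of_mem_items
    · simpa using hm
    · simpa [PySem.Dict.keys] using hnd
  rw [h1]
  rfl

lemma aScan_eq (vec : List (Int × Option (List (List Int)))) (hnd : (vec.map Prod.fst).Nodup) :
    aScan vec = (cands vec).foldl sstep (2000, 0, none) := by
  unfold aScan cands
  rw [foldl_flatMap']
  apply PySem.List.foldl_congr_mem
  intro acc kv hkv
  rw [lookup_eq vec hnd kv hkv]
  cases h2 : kv.2 with
  | none => simp [blockC, h2]
  | some items =>
      simp only [blockC, h2, Option.getD_some, List.foldl_map]
      apply PySem.List.foldl_congr_mem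
      intro st item _
      simp [sstep, candOf]

lemma bEntries_eq (vec : List (Int × Option (List (List Int)))) (hnd : (vec.map Prod.fst).Nodup) :
    bEntries vec = tagFrom 0 (fcands vec) := by
  have bBuild : ∀ (C : List (Int × List Int × Int)) (es : List (Int × Int × Int)),
      C.foldl (fun es c => if c.1 < 2000 then es ++ [(c.1, PySem.List.len es, c.2.2)] else es) es
        = es ++ tagFrom es.length (C.filter (fun c => c.1 < 2000)) := by
    intro C
    induction C with
    | nil => intro es; simp [tagFrom]
    | cons c t ih =>
        intro es
        by_cases hc : c.1 < 2000
        · simp only [List.foldl_cons, if_pos hc, List.filter_cons, hc, decide_true, if_true, ih]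
          rw [List.append_assoc]
          congr 1
          simp only [tagFrom, PySem.List.len_eq, List.singleton_append, List.length_append,
            List.length_singleton]
          have hcast : ((es.length + 1 : Nat) : Int) = (es.length : Int) + 1 := by push_cast; ring
          rw [hcast]
        · simp only [List.foldl_cons, if_neg hc, List.filter_cons, hc, decide_false,
            Bool.false_eq_true, if_false, ih]
  unfold bEntries fcands cands
  have hcongr : vec.foldl (fun entries kv =>
      match (PySem.Dict.get? (⟨vec⟩ : PySem.Dict Int (Option (List (List Int)))) kv.1).getD none with
      | none => entries
      | some items => items.foldl (fun es item =>
          if PySem.List.pyGetD item 0 0 < 2000 then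
            es ++ [(PySem.List.pyGetD item 0 0, PySem.List.len es, kv.1)]
          else es) entries) [] =
      vec.foldl (fun entries kv => (blockC kv).foldl
        (fun es c => if c.1 < 2000 then es ++ [(c.1, PySem.List.len es, c.2.2)] else es) entries) [] := by
    apply PySem.List.foldl_congr_mem
    intro acc kv hkv
    rw [lookup_eq vec hnd kv hkv]
    cases h2 : kv.2 with
    | none => simp [blockC, h2]
    | some items =>
        simp only [blockC, h2, Option.getD_some, List.foldl_map]
        apply PySem.List.foldl_congr_mem
        intro es item _
        simp [candOf]
  rw [hcongr, ← foldl_flatMap']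
  rw [bBuild]
  simp

lemma sorted2_eq_keyL (xs : List (Int × Int × Int)) :
    PySem.List.sorted2 xs (fun e => e.1) (fun e => e.2.1) = PySem.List.sorted xs keyL := by
  have hb : (fun (a b : Int × Int × Int) =>
      decide (a.1 < b.1) || (!decide (b.1 < a.1) && decide (a.2.1 < b.2.1)))
      = (fun (a b : Int × Int × Int) => decide (keyL a < keyL b)) := by
    funext a b
    by_cases h1 : a.1 < b.1
    · simp [keyL, Prod.Lex.toLex_lt_toLex, h1]
    · by_cases h2 : b.1 < a.1
      · simp [keyL, Prod.Lex.toLex_lt_toLex, h1, h2]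
        omega
      · have he : a.1 = b.1 := le_antisymm (not_lt.1 h2) (not_lt.1 h1)
        simp [keyL, Prod.Lex.toLex_lt_toLex, h1, he]
  unfold PySem.List.sorted2 PySem.List.sorted
  simp only [Bool.false_eq_true, if_false]
  apply PySem.List.foldl_congr_mem
  intro acc x _
  rw [hb]

lemma foldl_sstep_filter (C : List (Int × List Int × Int)) (st : Int × Int × Option (List Int))
    (h : st.1 ≤ 2000) : C.foldl sstep st = (C.filter (fun c => c.1 < 2000)).foldl sstep st := by
  induction C generalizing st with
  | nil => rfl
  | cons c t ih =>
      by_cases hc : c.1 < 2000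
      · have : sstep st c = if st.1 > c.1 then (c.1, c.2.2, some c.2.1) else st := rfl
        simp only [List.foldl_cons, List.filter_cons, hc, decide_true, if_true]
        apply ih
        simp only [sstep]; split_ifs <;> omega
      · have hno : ¬ st.1 > c.1 := by omega
        simp only [List.foldl_cons, List.filter_cons, sstep, if_neg hno, hc, decide_false,
          Bool.false_eq_true, if_false]
        exact ih st h

lemma foldl_sstep_no_update (C : List (Int × List Int × Int)) (st : Int × Int × Option (List Int))
    (h : ∀ c ∈ C, st.1 ≤ c.1) : C.foldl sstep st = st := by
  induction C generalizing st with
  | nil => rfl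
  | cons c t ih =>
      have hc := h c (by simp)
      simp only [List.foldl_cons, sstep, if_neg (by omega : ¬ st.1 > c.1)]
      exact ih st (fun c hc' => h c (by simp [hc']))

lemma foldl_sstep_gt (C : List (Int × List Int × Int)) (st : Int × Int × Option (List Int)) (v : Int)
    (h : v < st.1) (h2 : ∀ c ∈ C, v < c.1) : v < (C.foldl sstep st).1 := by
  induction C generalizing st with
  | nil => exact h
  | cons c t ih =>
      simp only [List.foldl_cons, sstep]
      split_ifs with hgt
      · exact ih _ (by simpa using h2 c (by simp)) (fun x hx => h2 x (by simp [hx]))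
      · exact ih _ h (fun x hx => h2 x (by simp [hx]))

lemma scan_split (A₁ A₂ : List (Int × List Int × Int)) (m : Int × List Int × Int)
    (h1 : ∀ c ∈ A₁, m.1 < c.1) (h2 : ∀ c ∈ A₂, m.1 ≤ c.1) (hm : m.1 < 2000) :
    (A₁ ++ m :: A₂).foldl sstep (2000, 0, none) = (m.1, m.2.2, some m.2.1) := by
  rw [List.foldl_append]
  have h0 : m.1 < ((2000 : Int), (0 : Int), (none : Option (List Int))).1 := by simpa using hm
  have hst := foldl_sstep_gt A₁ (2000, 0, none) m.1 h0 h1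
  simp only [List.foldl_cons]
  have : sstep (A₁.foldl sstep (2000, 0, none)) m = (m.1, m.2.2, some m.2.1) := by
    simp only [sstep, if_pos (by omega : (A₁.foldl sstep (2000, 0, none)).1 > m.1)]
  rw [this]
  exact foldl_sstep_no_update A₂ _ (by simpa using h2)

lemma exists_fm_split (E : List (Int × List Int × Int)) (hne : E ≠ []) :
    ∃ A₁ m A₂, E = A₁ ++ m :: A₂ ∧ (∀ c ∈ A₁, m.1 < c.1) ∧ (∀ c ∈ A₂, m.1 ≤ c.1) := by
  induction E with
  | nil => exact absurd rfl hne
  | cons c t ih =>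
      rcases eq_or_ne t [] with rfl | ht
      · exact ⟨[], c, [], by simp⟩
      · obtain ⟨A₁, m, A₂, heq, hA1, hA2⟩ := ih ht
        by_cases hc : c.1 ≤ m.1
        · refine ⟨[], c, t, rfl, by simp, ?_⟩
          intro x hx
          rw [heq] at hx
          rcases List.mem_append.1 hx with hx | hx
          · exact le_of_lt (lt_of_le_of_lt hc (hA1 x hx))
          · rcases List.mem_cons.1 hx with rfl | hx
            · exact hc
            · exact le_trans hc (hA2 x hx)
        · exact ⟨c :: A₁, m, A₂, by rw [heq]; rfl, by
            intro x hx
            rcases List.mem_cons.1 hx with rfl | hx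
            · omega
            · exact hA1 x hx, hA2⟩

lemma tagFrom_append (n : Int) (A B : List (Int × List Int × Int)) :
    tagFrom n (A ++ B) = tagFrom n A ++ tagFrom (n + A.length) B := by
  induction A generalizing n with
  | nil => simp [tagFrom]
  | cons c t ih =>
      simp only [List.cons_append, tagFrom, ih (n+1), List.length_cons]
      have : n + 1 + (t.length : Int) = n + ((t.length : Nat) + 1 : Nat) := by push_cast; ring
      rw [this]

lemma mem_tagFrom (n : Int) (E : List (Int × List Int × Int)) (e : Int × Int × Int)
    (h : e ∈ tagFrom n E) : (n ≤ e.2.1 ∧ e.2.1 < n + E.length) ∧ ∃ c ∈ E, e.1 = c.1 ∧ e.2.2 = c.2.2 := by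
  induction E generalizing n with
  | nil => simp [tagFrom] at h
  | cons c t ih =>
      simp only [tagFrom, List.mem_cons] at h
      rcases h with rfl | h
      · exact ⟨⟨le_refl n, by simp only [List.length_cons]; omega⟩, c, by simp⟩
      · obtain ⟨⟨hlo, hhi⟩, c', hc', h1, h2⟩ := ih (n+1) h
        refine ⟨⟨by omega, ?_⟩, c', by simp [hc'], h1, h2⟩
        simp only [List.length_cons]
        omega

lemma tagFrom_pairwise (n : Int) (E : List (Int × List Int × Int)) :
    (tagFrom n E).Pairwise (fun a b => a.2.1 < b.2.1) := by
  induction E generalizing n with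
  | nil => exact List.Pairwise.nil
  | cons c t ih =>
      refine List.Pairwise.cons (fun e he => ?_) (ih (n+1))
      have := (mem_tagFrom (n+1) t e he).1.1
      simpa using by omega

-- the sequence-shift map used when one candidate at position p is removed
def shiftE (p : Int) (e : Int × Int × Int) : Int × Int × Int :=
  (e.1, if p ≤ e.2.1 then e.2.1 + 1 else e.2.1, e.2.2)

lemma map_shiftE_tagFrom (p n : Int) (E : List (Int × List Int × Int)) (h : p ≤ n) :
    (tagFrom n E).map (shiftE p) = tagFrom (n + 1) E := by
  induction E generalizing n with
  | nil => rfl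
  | cons c t ih =>
      simp only [tagFrom, List.map_cons, shiftE, if_pos h]
      exact congrArg _ (ih (n+1) (by omega))

lemma sorted_pairwise_lt (T : List (Int × Int × Int)) (h : T.Pairwise (fun a b => a.2.1 < b.2.1)) :
    (PySem.List.sorted T keyL).Pairwise (fun a b => keyL a < keyL b) := by
  have hle := PySem.List.sorted_pairwise T keyL
  have hmapnd : ((PySem.List.sorted T keyL false).map (fun e => e.2.1)).Nodup := by
    have h1 : (T.map (fun e => e.2.1)).Pairwise (· < ·) := List.pairwise_map.2 h
    have h2 : (T.map (fun e => e.2.1)).Nodup := h1.imp ne_of_lt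
    exact h2.perm ((PySem.List.sorted_perm T keyL false).map (fun e => e.2.1)).symm
  have hseq : (PySem.List.sorted T keyL false).Pairwise (fun a b => a.2.1 ≠ b.2.1) :=
    List.pairwise_map.1 hmapnd
  exact (hle.and hseq).imp (fun hab => lt_of_le_of_ne hab.1 (fun he => hab.2 (by
    have := congrArg (fun x : Int ×ₗ Int => (ofLex x).2) he
    simpa [keyL] using this)))

lemma shiftE_mono (p : Int) (a b : Int × Int × Int) (h : keyL a < keyL b) :
    keyL (shiftE p a) < keyL (shiftE p b) := by
  simp only [keyL, shiftE, Prod.Lex.toLex_lt_toLex] at h ⊢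
  rcases h with h | ⟨h1, h2⟩
  · exact Or.inl h
  · refine Or.inr ⟨h1, ?_⟩
    split_ifs <;> omega

lemma pairwise_seq_append (A₁ A₂ : List (Int × List Int × Int)) :
    (tagFrom 0 A₁ ++ tagFrom ((A₁.length : Int) + 1) A₂).Pairwise (fun a b => a.2.1 < b.2.1) := by
  refine List.pairwise_append.2 ⟨tagFrom_pairwise 0 A₁, tagFrom_pairwise _ A₂, ?_⟩
  intro a ha b hb
  have h1 := (mem_tagFrom 0 A₁ a ha).1
  have h2 := (mem_tagFrom ((A₁.length : Int) + 1) A₂ b hb).1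
  omega

lemma sorted_shift (p : Int) (T : List (Int × Int × Int))
    (hp : T.Pairwise (fun a b => a.2.1 < b.2.1)) :
    PySem.List.sorted (T.map (shiftE p)) keyL = (PySem.List.sorted T keyL).map (shiftE p) := by
  apply PySem.List.sorted_eq_of_perm_of_pairwise_lt
  · exact ((PySem.List.sorted_perm T keyL false).map (shiftE p))
  · exact List.pairwise_map.2 ((sorted_pairwise_lt T hp).imp (fun h => shiftE_mono p _ _ h))

lemma sorted_keys_step (A₁ A₂ : List (Int × List Int × Int)) (m : Int × List Int × Int)
    (h1 : ∀ c ∈ A₁, m.1 < c.1) (h2 : ∀ c ∈ A₂, m.1 ≤ c.1) :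
    (PySem.List.sorted (tagFrom 0 (A₁ ++ m :: A₂)) keyL).map (fun e => e.2.2)
      = m.2.2 :: (PySem.List.sorted (tagFrom 0 (A₁ ++ A₂)) keyL).map (fun e => e.2.2) := by
  set p : Int := (A₁.length : Int) with hp
  have hM : tagFrom 0 (A₁ ++ m :: A₂)
      = tagFrom 0 A₁ ++ (m.1, p, m.2.2) :: tagFrom (p + 1) A₂ := by
    rw [tagFrom_append]
    simp only [zero_add]
    rfl
  have hR : tagFrom 0 (A₁ ++ A₂) = tagFrom 0 A₁ ++ tagFrom p A₂ := by
    rw [tagFrom_append]; simp only [zero_add]; rw [← hp]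
  have hMlt : ∀ t ∈ tagFrom 0 A₁ ++ tagFrom (p + 1) A₂, keyL (m.1, p, m.2.2) < keyL t := by
    intro t ht
    rcases List.mem_append.1 ht with ht | ht
    · obtain ⟨hrange, c, hc, hval, _⟩ := mem_tagFrom 0 A₁ t ht
      have := h1 c hc
      simp only [keyL, Prod.Lex.toLex_lt_toLex]
      left
      omega
    · obtain ⟨hrange, c, hc, hval, _⟩ := mem_tagFrom (p + 1) A₂ t ht
      have := h2 c hc
      simp only [keyL, Prod.Lex.toLex_lt_toLex]
      rcases lt_or_eq_of_le (show m.1 ≤ t.1 by omega) with hlt | heq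
      · exact Or.inl hlt
      · exact Or.inr ⟨heq, by show p < t.2.1; omega⟩
  have hsortT : PySem.List.sorted (tagFrom 0 (A₁ ++ m :: A₂)) keyL
      = (m.1, p, m.2.2) :: PySem.List.sorted (tagFrom 0 A₁ ++ tagFrom (p + 1) A₂) keyL := by
    rw [hM]
    apply PySem.List.sorted_eq_of_perm_of_pairwise_lt
    · refine List.Perm.trans ?_ List.perm_middle.symm
      exact List.Perm.cons _ (PySem.List.sorted_perm _ keyL false)
    · refine List.Pairwise.cons ?_ (sorted_pairwise_lt _ (pairwise_seq_append A₁ A₂))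
      intro t ht
      exact hMlt t ((PySem.List.mem_sorted _ _ _ _).1 ht)
  have hshift : tagFrom 0 A₁ ++ tagFrom (p + 1) A₂ = (tagFrom 0 (A₁ ++ A₂)).map (shiftE p) := by
    rw [hR, List.map_append]
    congr 1
    · have hid : ∀ e ∈ tagFrom 0 A₁, shiftE p e = id e := by
        intro e he
        have := (mem_tagFrom 0 A₁ e he).1
        simp only [shiftE, if_neg (by omega : ¬ p ≤ e.2.1), id]
      rw [List.map_congr_left hid, List.map_id]
    · exact (map_shiftE_tagFrom p p A₂ le_rfl).symm
  have hTpair : (tagFrom 0 (A₁ ++ A₂)).Pairwise (fun a b => a.2.1 < b.2.1) :=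
    tagFrom_pairwise 0 _
  rw [hsortT, List.map_cons, hshift, sorted_shift p _ hTpair, List.map_map]
  rfl

lemma filter_erase {α : Type} [BEq α] [LawfulBEq α] (p : α → Bool) (L : List α) (x : α)
    (hx : p x = true) : (L.erase x).filter p = (L.filter p).erase x := by
  induction L with
  | nil => rfl
  | cons a t ih =>
      by_cases ha : a = x
      · subst ha
        rw [List.erase_cons_head, List.filter_cons, if_pos hx, List.erase_cons_head]
      · rw [List.erase_cons_tail (by simp [ha]), List.filter_cons, List.filter_cons]
        by_cases hpa : p a = true
        · rw [if_pos hpa, if_pos hpa, List.erase_cons_tail (by simp [ha]), ih]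
        · simp only [hpa, Bool.false_eq_true, if_false]
          exact ih

lemma remove_step (vec : List (Int × Option (List (List Int)))) (hnd : (vec.map Prod.fst).Nodup)
    (A₁ A₂ : List (Int × List Int × Int)) (m : Int × List Int × Int)
    (hsplit : fcands vec = A₁ ++ m :: A₂) (h1 : ∀ c ∈ A₁, m.1 < c.1) :
    ((aRemove vec m.2.2 m.2.1).map Prod.fst).Nodup ∧ fcands (aRemove vec m.2.2 m.2.1) = A₁ ++ A₂ := by
  have hmF : m ∈ fcands vec := by rw [hsplit]; exact List.mem_append_right _ (List.mem_cons_self)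
  have hm2000 : m.1 < 2000 := by simpa using (List.of_mem_filter hmF)
  have hmC : m ∈ cands vec := List.mem_of_mem_filter hmF
  obtain ⟨kv, hkv, hmB⟩ := List.mem_flatMap.1 hmC
  obtain ⟨item, hitem, hcand⟩ := List.mem_map.1 hmB
  obtain ⟨l, hl⟩ : ∃ l, kv.2 = some l := by
    cases h : kv.2 with
    | none => rw [h] at hitem; simp at hitem
    | some l => exact ⟨l, rfl⟩
  rw [hl] at hitem
  simp only [Option.getD_some] at hitem
  have hmkey : m.2.2 = kv.1 := by rw [← hcand]; rfl
  have hmitem : m.2.1 = item := by rw [← hcand]; rfl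
  obtain ⟨pre, post, hvec⟩ := List.append_of_mem hkv
  have hkeys : vec.map Prod.fst = pre.map Prod.fst ++ kv.1 :: post.map Prod.fst := by
    rw [hvec]; simp
  have hnd2 : (pre.map Prod.fst ++ kv.1 :: post.map Prod.fst).Nodup := by
    rw [← hkeys]; exact hnd
  have hnotpp : kv.1 ∉ pre.map Prod.fst ∧ kv.1 ∉ post.map Prod.fst := by
    have h := hnd2
    simp only [List.nodup_append, List.nodup_cons] at h
    obtain ⟨-, ⟨hpost, -⟩, h3⟩ := h
    exact ⟨fun hm => h3 kv.1 hm kv.1 (List.mem_cons_self) rfl, hpost⟩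
  have hnotpre := hnotpp.1
  have hnotpost := hnotpp.2
  have hremove : aRemove vec m.2.2 m.2.1 = pre ++ (kv.1, some (l.erase item)) :: post := by
    unfold aRemove PySem.Dict.modify
    have hget : (PySem.Dict.get? (⟨vec⟩ : PySem.Dict Int (Option (List (List Int)))) kv.1).getD none = kv.2 :=
      lookup_eq vec hnd kv hkv
    have hgetD : (⟨vec⟩ : PySem.Dict Int (Option (List (List Int)))).getD kv.1 none = some l := by
      rw [PySem.Dict.getD_eq_get?_getD, hget, hl]
    have hcontains : (⟨vec⟩ : PySem.Dict Int (Option (List (List Int)))).contains kv.1 = true := by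
      rw [PySem.Dict.contains_iff_mem_keys]
      show kv.1 ∈ vec.map Prod.fst
      rw [hkeys]
      exact List.mem_append_right _ (List.mem_cons_self)
    rw [hmkey, hmitem, hgetD]
    have hrem : (PySem.List.remove? l item).getD l = l.erase item := by
      rw [PySem.List.remove?_eq_some_erase l item hitem]; rfl
    rw [PySem.Dict.items_insert_of_contains _ _ hcontains]
    show vec.map (fun p => if (p.1 == kv.1) = true then (kv.1, some ((PySem.List.remove? l item).getD l)) else p)
        = pre ++ (kv.1, some (l.erase item)) :: post
    rw [hrem, hvec, List.map_append, List.map_cons]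
    congr 1
    · apply (List.map_congr_left (g := id) ?_).trans (List.map_id _)
      intro a ha
      have : a.1 ≠ kv.1 := fun he => hnotpre (he ▸ List.mem_map_of_mem ha)
      simp [this]
    · congr 1
      · simp
      · apply (List.map_congr_left (g := id) ?_).trans (List.map_id _)
        intro a ha
        have : a.1 ≠ kv.1 := fun he => hnotpost (he ▸ List.mem_map_of_mem ha)
        simp [this]
  constructor
  · rw [hremove]
    have : (pre ++ (kv.1, some (l.erase item)) :: post).map Prod.fst = vec.map Prod.fst := by
      rw [hkeys]; simp
    rw [this]
    exact hnd
  · have hblock : blockC (kv.1, some (l.erase item)) = (blockC kv).erase m := by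
      show (l.erase item).map (candOf kv.1) = ((kv.2.getD []).map (candOf kv.1)).erase m
      rw [hl]
      have hinj : Function.Injective (candOf kv.1) := by
        intro a b hab
        exact congrArg (fun c : Int × List Int × Int => c.2.1) hab
      rw [Option.getD_some, List.map_erase hinj, hcand]
    have hFsplit : fcands vec
        = (pre.flatMap blockC).filter (fun c => c.1 < 2000)
          ++ ((blockC kv).filter (fun c => c.1 < 2000)
          ++ (post.flatMap blockC).filter (fun c => c.1 < 2000)) := by
      unfold fcands cands
      rw [hvec]
      simp [List.filter_append]
    have hFsplit' : fcands (aRemove vec m.2.2 m.2.1)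
        = (pre.flatMap blockC).filter (fun c => c.1 < 2000)
          ++ (((blockC kv).erase m).filter (fun c => c.1 < 2000)
          ++ (post.flatMap blockC).filter (fun c => c.1 < 2000)) := by
      unfold fcands cands
      rw [hremove, ← hblock]
      simp [List.filter_append]
    have hmnotpre : m ∉ (pre.flatMap blockC).filter (fun c => c.1 < 2000) := by
      intro hmem
      obtain ⟨kv', hkv', hmB'⟩ := List.mem_flatMap.1 (List.mem_of_mem_filter hmem)
      obtain ⟨item', _, hcand'⟩ := List.mem_map.1 hmB'
      have : m.2.2 = kv'.1 := by rw [← hcand']; rfl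
      exact hnotpre (by rw [← hmkey, this]; exact List.mem_map_of_mem hkv')
    have hmA1 : m ∉ A₁ := by
      intro hmem
      exact absurd rfl (ne_of_gt (h1 m hmem) : ¬ m.1 = m.1)
    have hmblockF : m ∈ (blockC kv).filter (fun c => c.1 < 2000) :=
      List.mem_filter.2 ⟨hmB, by simpa using hm2000⟩
    have herase : (fcands vec).erase m = A₁ ++ A₂ := by
      rw [hsplit, List.erase_append_right _ hmA1, List.erase_cons_head]
    rw [hFsplit', filter_erase (fun c => decide (c.1 < 2000)) (blockC kv) m (by simpa using hm2000)]
    rw [← List.erase_append_left _ hmblockF, ← List.erase_append_right _ hmnotpre, ← hFsplit, herase]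

lemma emitK_zero (ks : List Int) (cur : String) : emitK ks 0 cur = cur := by
  cases ks <;> rfl

lemma emitK_nil (n : Nat) (cur : String) :
    emitK [] n cur = cur ++ String.ofList (List.replicate n '0') := by
  cases n with
  | zero =>
      show cur = cur ++ String.ofList []
      apply String.ext
      simp
  | succ n => rfl

lemma emit_eq (S : List (Int × Int × Int)) (n : Nat) (cur : String) :
    (let st := S.foldl
        (fun (st : String × Int) e =>
          if st.2 ≤ 0 then st else (st.1 ++ PySem.Int.toStr e.2.2, st.2 - 1))
        (cur, (n : Int));
      if st.2 > 0 then st.1 ++ String.ofList (PySem.List.pyRepeat ['0'] st.2) else st.1)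
      = emitK (S.map (fun e => e.2.2)) n cur := by
  have hstay : ∀ (S : List (Int × Int × Int)) (st : String × Int), st.2 ≤ 0 →
      S.foldl (fun (st : String × Int) e =>
        if st.2 ≤ 0 then st else (st.1 ++ PySem.Int.toStr e.2.2, st.2 - 1)) st = st := by
    intro S
    induction S with
    | nil => intro st h; rfl
    | cons e t ih => intro st h; simp only [List.foldl_cons, if_pos h]; exact ih st h
  induction S generalizing n cur with
  | nil =>
      cases n with
      | zero => simp [emitK]
      | succ n =>
          simp only [List.foldl_nil]
          rw [if_pos (by exact_mod_cast Nat.succ_pos n)]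
          rw [PySem.List.pyRepeat_singleton]
          norm_num
          rfl
  | cons e t ih =>
      cases n with
      | zero =>
          simp only [List.foldl_cons, if_pos (by norm_num : ((0:Nat) : Int) ≤ 0)]
          rw [hstay t (cur, ((0:Nat) : Int)) (by norm_num)]
          simp [emitK]
      | succ n =>
          simp only [List.foldl_cons]
          rw [if_neg (by exact_mod_cast Nat.not_succ_le_zero n : ¬ ((n+1 : Nat) : Int) ≤ 0)]
          have hcast : ((n+1 : Nat) : Int) - 1 = ((n : Nat) : Int) := by push_cast; ring
          simp only [hcast]
          exact ih n (cur ++ PySem.Int.toStr e.2.2)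

lemma main_loop (n : Nat) (vec : List (Int × Option (List (List Int)))) (cur : String)
    (hnd : (vec.map Prod.fst).Nodup) :
    aLoop n vec cur
      = emitK ((PySem.List.sorted (tagFrom 0 (fcands vec)) keyL).map (fun e => e.2.2)) n cur := by
  induction n generalizing vec cur with
  | zero => rw [emitK_zero]; rfl
  | succ n ih =>
      have hfc : (cands vec).filter (fun c => c.1 < 2000) = fcands vec := rfl
      by_cases hE : fcands vec = []
      · have hscan : aScan vec = (2000, 0, none) := by
          rw [aScan_eq vec hnd, foldl_sstep_filter _ _ (by norm_num), hfc, hE]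
          rfl
        have hstep : aLoop (n+1) vec cur = aLoop n vec (cur ++ PySem.Int.toStr 0) := by
          simp only [aLoop, hscan]
        rw [hstep, ih vec _ hnd, hE]
        show emitK [] n (cur ++ PySem.Int.toStr 0) = emitK [] (n+1) cur
        rw [emitK_nil, emitK_nil]
        have h0 : PySem.Int.toStr 0 = "0" := rfl
        rw [h0]
        apply String.ext
        simp [List.replicate_succ]
      · obtain ⟨A₁, m, A₂, hsp, h1, h2⟩ := exists_fm_split _ hE
        have hm2000 : m.1 < 2000 := by
          have hmem : m ∈ fcands vec := by
            rw [hsp]; exact List.mem_append_right _ (List.mem_cons_self)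
          simpa using List.of_mem_filter hmem
        have hscan : aScan vec = (m.1, m.2.2, some m.2.1) := by
          rw [aScan_eq vec hnd, foldl_sstep_filter _ _ (by norm_num), hfc, hsp]
          exact scan_split A₁ A₂ m h1 h2 hm2000
        obtain ⟨hnd', hfc'⟩ := remove_step vec hnd A₁ A₂ m hsp h1
        have hstep : aLoop (n+1) vec cur
            = aLoop n (aRemove vec m.2.2 m.2.1) (cur ++ PySem.Int.toStr m.2.2) := by
          simp only [aLoop, hscan]
        rw [hstep, ih _ _ hnd', hfc', hsp, sorted_keys_step A₁ A₂ m h1 h2]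
        rfl

-- ===== VERDICT (by name: the statement is the Claim_ definition above) =====
theorem convertNumbersToString_spec : Claim_equal_convertNumbersToString := by
  intro validIndex vector currentValue _hdom hpre
  obtain ⟨hvi, hnd, _⟩ := hpre
  unfold Spec_convertNumbersToString convertNumbersToString convertNumbersToString_alt
  by_cases hz : validIndex ≤ 0
  · have h0 : validIndex = 0 := le_antisymm hz hvi
    rw [if_pos hz, h0]
    rfl
  · rw [if_neg hz]
    rw [bEntries_eq vector hnd, sorted2_eq_keyL]
    have h := emit_eq (PySem.List.sorted (tagFrom 0 (fcands vector)) keyL) validIndex.toNat currentValue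
    rw [Int.toNat_of_nonneg hvi] at h
    simpa [main_loop validIndex.toNat vector currentValue hnd] using h.symm
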